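-- pv_equiv track=rewrite | github.com/rsupak/daily-programmer | n_queens.py | odd_queens
-- ===== SOURCE A (Python) =====
-- def odd_queens(num):
--     queen_locations = []
--     # start (0,0)
--     queens = num
--     x, y = 0, 0
--     # for i in range(n):
--     for _ in range(num):
--         # roll indices around borders cases
--         if x > num - 1:
--             x = x - num
--         if y > num - 1:
--             y = y - num
--         queen_locations.append((x,y))
--         # Move to next location || Down: 2, Right: 1
--         queens -= 1
--         x += 1
--         y += 2
--
--     return queen_locations
-- ===== SOURCE B (Python) =====
-- def odd_queens(num):
--     # Closed form: the x-coordinate is just the index i (it never wraps within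
--     # num iterations) and the y-coordinate is (2*i) mod num.
--     return [(i, (2 * i) % num) for i in range(num)]
-- ===== Notes on version B (the rewrite author's own statement) =====
-- stated objective: simpler
-- what changed: Replaced the loop threading mutable x/y accumulators with conditional wrap-around subtractions by a stateless closed-form comprehension (i, (2*i) % num).
import Mathlib
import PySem

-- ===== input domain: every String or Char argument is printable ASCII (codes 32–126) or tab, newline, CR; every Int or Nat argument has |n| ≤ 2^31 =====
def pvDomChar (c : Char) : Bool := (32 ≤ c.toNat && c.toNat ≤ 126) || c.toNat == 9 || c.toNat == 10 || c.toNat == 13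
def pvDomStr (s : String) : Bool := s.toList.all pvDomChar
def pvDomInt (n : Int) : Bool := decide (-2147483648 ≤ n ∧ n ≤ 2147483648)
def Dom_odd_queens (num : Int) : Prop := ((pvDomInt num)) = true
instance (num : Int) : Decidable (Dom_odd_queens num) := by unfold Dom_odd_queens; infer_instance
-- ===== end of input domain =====

-- B replaces A's accumulator loop with the closed form (i, (2*i) % num); objective: simpler.


-- ===== PORT A =====
-- literal transliteration of A's loop: state (queen_locations, queens, x, y)
def odd_queens (num : Int) : List (Int × Int) :=
  ((PySem.List.pyRange 0 num 1).foldl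
    (fun st _ =>
      let x := if st.2.2.1 > num - 1 then st.2.2.1 - num else st.2.2.1
      let y := if st.2.2.2 > num - 1 then st.2.2.2 - num else st.2.2.2
      (st.1 ++ [(x, y)], st.2.1 - 1, x + 1, y + 2))
    ([], num, 0, 0)).1

-- ===== PORT B =====
def odd_queens_alt (num : Int) : List (Int × Int) :=
  (PySem.List.pyRange 0 num 1).map (fun i => (i, PySem.Int.mod (2 * i) num))

-- ===== PRECONDITION & SPEC =====
def Spec_odd_queens (num : Int) (out : List (Int × Int)) : Prop := out = odd_queens_alt num
instance (num : Int) (out : List (Int × Int)) : Decidable (Spec_odd_queens num out) := by unfold Spec_odd_queens; infer_instance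

-- ===== CLAIM (what is proved, stated in full; the proofs are below) =====
def Claim_equal_odd_queens : Prop := ∀ (num : Int), Dom_odd_queens num → Spec_odd_queens num (odd_queens num)

-- ===== LEMMAS AND PROOFS =====

-- the y accumulator held at the start of iteration k (0-indexed)
def pvY (num : Int) (k : Nat) : Int :=
  if k = 0 then 0 else (2 * ((k : Int) - 1)) % num + 2

-- loop invariant: after k iterations the state is (first k pairs, num-k, k, pvY num k)
theorem pv_loop_inv (num : Int) (hnum : 0 < num) (k : Nat) (hk : (k : Int) ≤ num) :
    (PySem.List.pyRange 0 (k : Int) 1).foldl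
      (fun st (_ : Int) =>
        let x := if st.2.2.1 > num - 1 then st.2.2.1 - num else st.2.2.1
        let y := if st.2.2.2 > num - 1 then st.2.2.2 - num else st.2.2.2
        (st.1 ++ [(x, y)], st.2.1 - 1, x + 1, y + 2))
      ([], num, 0, 0)
    = ((PySem.List.pyRange 0 (k : Int) 1).map (fun i => (i, (2 * i) % num)),
        num - k, (k : Int), pvY num k) := by
  induction k with
  | zero => simp [PySem.List.pyRange_one_eq_nil, pvY]
  | succ n ih =>
    have hn : (n : Int) ≤ num := by push_cast at hk ⊢; omega
    have hsplit : PySem.List.pyRange 0 ((n : Int) + 1) 1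
        = PySem.List.pyRange 0 (n : Int) 1 ++ [(n : Int)] :=
      PySem.List.pyRange_one_succ_right (by exact_mod_cast Int.natCast_nonneg n)
    have hlt : (n : Int) < num := by push_cast at hk; omega
    have hx : ¬ ((n : Int) > num - 1) := by omega
    have hy : (if pvY num n > num - 1 then pvY num n - num else pvY num n)
        = (2 * (n : Int)) % num := by
      rcases Nat.eq_zero_or_pos n with h0 | hpos
      · subst h0
        rw [pvY, if_pos rfl, if_neg (by omega : ¬ ((0:Int) > num - 1))]
        simp
      · have hne : n ≠ 0 := by omega
        have hn1 : (1 : Int) ≤ (n : Int) := by exact_mod_cast hpos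
        have hnum2 : 2 ≤ num := by omega
        set m := (2 * ((n : Int) - 1)) % num with hm
        have hm0 : 0 ≤ m := Int.emod_nonneg _ (by omega)
        have hm1 : m < num := Int.emod_lt_of_pos _ hnum
        have hcong : (2 * (n : Int)) % num = (m + 2) % num := by
          have h1 : (2 * ((n : Int) - 1)) % num = m % num := by
            rw [hm, Int.emod_emod_of_dvd _ dvd_rfl]
          calc (2 * (n : Int)) % num = (2 * ((n : Int) - 1) + 2) % num := by ring_nf
            _ = (m + 2) % num := by rw [Int.add_emod, h1, ← Int.add_emod]
        have hpv : pvY num n = m + 2 := by rw [pvY, if_neg hne]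
        rw [hpv, hcong]
        by_cases hc : m + 2 > num - 1
        · rw [if_pos hc, ← Int.sub_emod_right (m + 2) num,
              Int.emod_eq_of_lt (by omega) (by omega)]
        · rw [if_neg hc, Int.emod_eq_of_lt (by omega) (by omega)]
    push_cast
    push_cast at hsplit
    rw [hsplit, List.foldl_append, List.map_append, ih hn]
    simp only [List.foldl_cons, List.foldl_nil, List.map_cons, List.map_nil,
      if_neg hx, hy, Prod.mk.injEq]
    refine ⟨trivial, by ring, trivial, ?_⟩
    rw [pvY, if_neg (Nat.succ_ne_zero n)]
    push_cast
    ring_nf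

-- ===== VERDICT (by name: the statement is the Claim_ definition above) =====
theorem odd_queens_spec : Claim_equal_odd_queens := by
  intro num _
  unfold Spec_odd_queens odd_queens odd_queens_alt
  by_cases h : num ≤ 0
  · rw [PySem.List.pyRange_one_eq_nil h]; rfl
  · have h : 0 < num := by omega
    have hk : ((num.toNat : Int)) = num := Int.toNat_of_nonneg h.le
    have hinv := pv_loop_inv num h num.toNat (by omega)
    rw [hk] at hinv
    rw [hinv]
    refine List.map_congr_left (fun i hi => ?_)
    rw [PySem.Int.mod_eq_emod_of_pos h]
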